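-- pv_equiv track=rewrite | github.com/debjde6400/cerec-2 | Ghosh01.py | doubling
-- ===== SOURCE A (Python) =====
-- def doubling(binary):
--     """
--     Converts a bit string to a decimal number using successive
--     doubling
--     """
--     # *** Remove the keyword 'pass' and insert your program
--     # code here ***
--     number=0
--     rev_s=''
--     for c in binary:
--         rev_s=c+rev_s
--
--     i=0
--     for d in rev_s:
--         if(d == '1'):
--             number+=2**i
--         i+=1
--     return number
-- ===== SOURCE B (Python) =====
-- def doubling(binary):
--     """Converts a bit string to a decimal number: single left-to-right
--     Horner pass (number = number*2 + bit), no reversal, no 2**i."""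
--     number = 0
--     for c in binary:
--         number = number * 2 + (1 if c == '1' else 0)
--     return number
-- ===== Notes on version B (the rewrite author's own statement) =====
-- stated objective: faster
-- what changed: Replaced the reverse-then-sum-of-2**i double pass with a single left-to-right Horner pass (number = number*2 + bit), eliminating the string reversal and the per-bit exponentiation.
import Mathlib
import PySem

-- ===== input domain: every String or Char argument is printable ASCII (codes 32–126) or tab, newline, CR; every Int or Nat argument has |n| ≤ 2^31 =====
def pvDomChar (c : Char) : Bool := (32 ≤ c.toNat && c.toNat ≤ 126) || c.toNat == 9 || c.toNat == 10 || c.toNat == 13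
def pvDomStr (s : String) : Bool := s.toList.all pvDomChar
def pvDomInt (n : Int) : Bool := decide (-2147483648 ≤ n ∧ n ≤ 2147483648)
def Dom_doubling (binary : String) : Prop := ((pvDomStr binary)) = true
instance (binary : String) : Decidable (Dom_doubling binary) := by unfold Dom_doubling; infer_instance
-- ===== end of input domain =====

-- B replaces A's reverse-then-sum-of-2**i double pass by one Horner pass (faster).

-- ===== PORT A =====
-- first loop: rev_s = c + rev_s  (string as List Char, prepend)
-- second loop: i counter, number += 2**i when d == '1'
def doubling (binary : String) : Int :=
  let rev_s : List Char := binary.toList.foldl (fun r c => c :: r) []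
  (rev_s.foldl
    (fun (st : Int × Int) d =>
      (if d = '1' then st.1 + 2 ^ st.2.toNat else st.1, st.2 + 1))
    (0, 0)).1

-- ===== PORT B =====
def doubling_alt (binary : String) : Int :=
  binary.toList.foldl (fun number c => number * 2 + (if c = '1' then 1 else 0)) 0

-- ===== PRECONDITION & SPEC =====
def Spec_doubling (binary : String) (out : Int) : Prop := out = doubling_alt binary
instance (binary : String) (out : Int) : Decidable (Spec_doubling binary out) := by unfold Spec_doubling; infer_instance

-- ===== CLAIM (what is proved, stated in full; the proofs are below) =====
def Claim_equal_doubling : Prop := ∀ (binary : String), Dom_doubling binary → Spec_doubling binary (doubling binary)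

-- ===== LEMMAS AND PROOFS =====

-- low-order-first value of a bit list
def pvVal : List Char → Int
  | [] => 0
  | d :: t => (if d = '1' then 1 else 0) + 2 * pvVal t

theorem pv_fold_rev (l : List Char) (r : List Char) :
    l.foldl (fun r c => c :: r) r = l.reverse ++ r := by
  induction l generalizing r with
  | nil => simp
  | cons c t ih => simp [List.foldl, ih]

theorem pv_loop2 (l : List Char) (n i : Int) (hi : 0 ≤ i) :
    (l.foldl
      (fun (st : Int × Int) d =>
        (if d = '1' then st.1 + 2 ^ st.2.toNat else st.1, st.2 + 1))
      (n, i)).1 = n + 2 ^ i.toNat * pvVal l := by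
  induction l generalizing n i with
  | nil => simp [pvVal]
  | cons d t ih =>
    have h1 : (i + 1).toNat = i.toNat + 1 := by omega
    simp only [List.foldl]
    rw [ih _ _ (by omega)]
    by_cases hd : d = '1' <;> simp [hd, pvVal, h1, pow_succ] <;> ring

theorem pv_val_append (xs : List Char) (d : Char) :
    pvVal (xs ++ [d]) = pvVal xs + (if d = '1' then 1 else 0) * 2 ^ xs.length := by
  induction xs with
  | nil => simp [pvVal]
  | cons c t ih => simp [pvVal, ih, pow_succ]; split_ifs <;> ring

theorem pv_horner (l : List Char) (n : Int) :
    l.foldl (fun number c => number * 2 + (if c = '1' then 1 else 0)) n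
      = n * 2 ^ l.length + pvVal l.reverse := by
  induction l generalizing n with
  | nil => simp [pvVal]
  | cons c t ih =>
    simp only [List.foldl, List.reverse_cons]
    rw [ih, pv_val_append]
    simp [pow_succ]
    split_ifs <;> ring

-- ===== VERDICT (by name: the statement is the Claim_ definition above) =====
theorem doubling_spec : Claim_equal_doubling := by
  intro binary _
  unfold Spec_doubling doubling doubling_alt
  rw [pv_fold_rev, pv_horner, pv_loop2 _ _ _ (le_refl 0)]
  simp
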